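-- pv_equiv track=rewrite | github.com/kk-digital/kcg-ml-sd1p4 | ga/prompt_generator.py | get_sorted_list_with_cumulative
-- ===== SOURCE A (Python) =====
-- def get_sorted_list_with_cumulative(phrases, phrases_token_size, count_list):
--     # sort by count
--     sorted_phrases = []
--     sorted_token_size = []
--     sorted_count = []
--     sorted_cumulative_sum = []
--     sorted_indexes = sorted(range(len(count_list)), key=lambda x: count_list[x], reverse=True)
--
--     prev_sum = 0
--     for i in sorted_indexes:
--         sorted_phrases.append(phrases[i])
--         sorted_token_size.append(phrases_token_size[i])
--         sorted_count.append(count_list[i])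
--
--         # add cumulative sum
--         cumulative_sum = prev_sum + count_list[i]
--         sorted_cumulative_sum.append(cumulative_sum)
--         prev_sum = cumulative_sum
--
--     return sorted_phrases, sorted_token_size, sorted_count, sorted_cumulative_sum
-- ===== SOURCE B (Python) =====
-- def get_sorted_list_with_cumulative(phrases, phrases_token_size, count_list):
--     # bucket the zipped entries by count value in one pass, then emit the buckets
--     # in descending count order (each bucket keeps the original order, which is
--     # exactly what a stable descending sort by count produces)
--     groups = {}
--     for t in zip(phrases, phrases_token_size, count_list):
--         groups.setdefault(t[2], []).append(t)
--     sorted_phrases = []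
--     sorted_token_size = []
--     sorted_count = []
--     sorted_cumulative_sum = []
--     total = 0
--     for c in sorted(groups, reverse=True):
--         for p, tok, _ in groups[c]:
--             sorted_phrases.append(p)
--             sorted_token_size.append(tok)
--             sorted_count.append(c)
--             total += c
--             sorted_cumulative_sum.append(total)
--     return sorted_phrases, sorted_token_size, sorted_count, sorted_cumulative_sum
-- ===== Notes on version B (the rewrite author's own statement) =====
-- stated objective: alternative
-- what changed: Instead of stable-sorting all indices by count and gathering the three lists inside one loop, B buckets the zipped (phrase, token, count) entries into a dict keyed by count in one pass, sorts only the DISTINCT counts descending, and emits the buckets in that order (ties keep original order by construction) while accumulating the running sum; Pre_ excludes inputs where count_list is longer than phrases or phrases_token_size, on which A raises IndexError.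
import Mathlib
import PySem

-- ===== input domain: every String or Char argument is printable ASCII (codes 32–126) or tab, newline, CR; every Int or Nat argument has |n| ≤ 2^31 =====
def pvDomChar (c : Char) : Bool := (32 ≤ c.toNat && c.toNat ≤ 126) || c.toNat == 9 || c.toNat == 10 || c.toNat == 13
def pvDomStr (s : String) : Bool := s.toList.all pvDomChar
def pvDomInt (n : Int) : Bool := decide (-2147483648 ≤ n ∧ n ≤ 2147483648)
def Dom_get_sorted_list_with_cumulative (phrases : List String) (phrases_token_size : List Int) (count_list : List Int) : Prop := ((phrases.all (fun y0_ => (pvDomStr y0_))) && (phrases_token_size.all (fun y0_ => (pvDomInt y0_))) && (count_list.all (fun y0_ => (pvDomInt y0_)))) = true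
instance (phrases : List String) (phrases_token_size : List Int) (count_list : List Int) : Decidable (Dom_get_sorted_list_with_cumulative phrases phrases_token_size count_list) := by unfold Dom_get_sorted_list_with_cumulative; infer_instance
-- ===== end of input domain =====

-- B buckets the zipped entries into a dict keyed by count, sorts only the DISTINCT counts
-- descending and emits the buckets, instead of stable-sorting all indices (objective: alternative).

-- ===== PORT A =====
-- inside Pre_ every index produced by pyRange/sorted is in range, so the `.getD` defaults are never used
def get_sorted_list_with_cumulative (phrases : List String) (phrases_token_size : List Int) (count_list : List Int) : List String × List Int × List Int × List Int :=
  let sorted_indexes := PySem.List.sorted (PySem.List.pyRange 0 (count_list.length : Int))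
      (fun x => (PySem.List.pyGet? count_list x).getD 0) true
  let st := sorted_indexes.foldl (fun (acc : List String × List Int × List Int × List Int × Int) i =>
      (acc.1 ++ [(PySem.List.pyGet? phrases i).getD ""],
       acc.2.1 ++ [(PySem.List.pyGet? phrases_token_size i).getD 0],
       acc.2.2.1 ++ [(PySem.List.pyGet? count_list i).getD 0],
       acc.2.2.2.1 ++ [acc.2.2.2.2 + (PySem.List.pyGet? count_list i).getD 0],
       acc.2.2.2.2 + (PySem.List.pyGet? count_list i).getD 0))
    ([], [], [], [], 0)
  (st.1, st.2.1, st.2.2.1, st.2.2.2.1)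

-- ===== PORT B =====
-- groups.setdefault(t[2], []).append(t) = Dict.modify t.2.2 [] (· ++ [t]);
-- sorted(groups, reverse=True) sorts the keys (distinct, identity key: exact)
def get_sorted_list_with_cumulative_alt (phrases : List String) (phrases_token_size : List Int) (count_list : List Int) : List String × List Int × List Int × List Int :=
  let groups := (phrases.zip (phrases_token_size.zip count_list)).foldl
      (fun (d : PySem.Dict Int (List (String × Int × Int))) t => d.modify t.2.2 [] (· ++ [t]))
      PySem.Dict.empty
  let ks := PySem.List.sorted groups.keys (fun x => x) true
  let st := ks.foldl (fun (acc : List String × List Int × List Int × List Int × Int) c =>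
      (groups.getD c []).foldl
        (fun (acc : List String × List Int × List Int × List Int × Int) t =>
          (acc.1 ++ [t.1], acc.2.1 ++ [t.2.1], acc.2.2.1 ++ [c],
           acc.2.2.2.1 ++ [acc.2.2.2.2 + c], acc.2.2.2.2 + c)) acc)
    ([], [], [], [], 0)
  (st.1, st.2.1, st.2.2.1, st.2.2.2.1)

-- ===== PRECONDITION & SPEC =====
-- Pre_ excludes inputs where count_list is longer than phrases or phrases_token_size:
-- there A raises IndexError while indexing phrases[i] / phrases_token_size[i].
def Pre_get_sorted_list_with_cumulative (phrases : List String) (phrases_token_size : List Int) (count_list : List Int) : Prop :=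
  count_list.length ≤ phrases.length ∧ count_list.length ≤ phrases_token_size.length
instance (phrases : List String) (phrases_token_size : List Int) (count_list : List Int) : Decidable (Pre_get_sorted_list_with_cumulative phrases phrases_token_size count_list) := by unfold Pre_get_sorted_list_with_cumulative; infer_instance
def pvWitness_get_sorted_list_with_cumulative : List String × List Int × List Int := (["a", "b", "c"], [1, 2, 3], [2, 5, 2])

def Spec_get_sorted_list_with_cumulative (phrases : List String) (phrases_token_size : List Int) (count_list : List Int) (out : List String × List Int × List Int × List Int) : Prop := out = get_sorted_list_with_cumulative_alt phrases phrases_token_size count_list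
instance (phrases : List String) (phrases_token_size : List Int) (count_list : List Int) (out : List String × List Int × List Int × List Int) : Decidable (Spec_get_sorted_list_with_cumulative phrases phrases_token_size count_list out) := by unfold Spec_get_sorted_list_with_cumulative; infer_instance

-- ===== CLAIM (what is proved, stated in full; the proofs are below) =====
def Claim_equal_get_sorted_list_with_cumulative : Prop := ∀ (phrases : List String) (phrases_token_size : List Int) (count_list : List Int), Dom_get_sorted_list_with_cumulative phrases phrases_token_size count_list → Pre_get_sorted_list_with_cumulative phrases phrases_token_size count_list → Spec_get_sorted_list_with_cumulative phrases phrases_token_size count_list (get_sorted_list_with_cumulative phrases phrases_token_size count_list)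

-- ===== LEMMAS AND PROOFS =====

-- cumulative sums starting from s
def pvCum (s : Int) : List Int → List Int
  | [] => []
  | x :: xs => (s + x) :: pvCum (s + x) xs

theorem pvCum_append (s : Int) (xs ys : List Int) :
    pvCum s (xs ++ ys) = pvCum s xs ++ pvCum (s + xs.sum) ys := by
  induction xs generalizing s with
  | nil => simp [pvCum]
  | cons x rest ih => simp [pvCum, ih, add_assoc]

-- the triples grouped by the keys of ks, groups in ks order, each group in original order
def pvGrp (l : List (String × Int × Int)) (ks : List Int) : List (String × Int × Int) :=
  ks.flatMap (fun c => l.filter (fun t => decide (t.2.2 = c)))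

theorem pvGrp_append_not_mem (l : List (String × Int × Int)) (ks : List Int)
    (x : String × Int × Int) (hx : x.2.2 ∉ ks) :
    pvGrp (l ++ [x]) ks = pvGrp l ks := by
  unfold pvGrp
  apply List.flatMap_congr
  intro c hc
  have : ¬ (x.2.2 = c) := fun h => hx (h ▸ hc)
  simp [List.filter_append, this]

theorem pv_insertBy_forall_before {α : Type} (before : α → α → Bool) (x : α) (bs : List α)
    (h : ∀ y ∈ bs, before x y = true) : PySem.List.insertBy before x bs = x :: bs := by
  cases bs with
  | nil => simp [PySem.List.insertBy]
  | cons y ys => simp [PySem.List.insertBy, h y (by simp)]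

theorem pv_insertBy_append_not_before {α : Type} (before : α → α → Bool) (x : α) (as bs : List α)
    (h : ∀ y ∈ as, before x y = false) :
    PySem.List.insertBy before x (as ++ bs) = as ++ PySem.List.insertBy before x bs := by
  induction as with
  | nil => simp
  | cons a rest ih =>
    have ha : before x a = false := h a (by simp)
    simp only [List.cons_append, PySem.List.insertBy, ha]
    simp [ih (fun y hy => h y (by simp [hy]))]

-- inserting x (stably, descending by the count field) into a grouped list appends x to its group
theorem pv_insert_grp (l : List (String × Int × Int)) (ks : List Int)
    (hks : ks.Pairwise (· > ·)) (x : String × Int × Int) (hx : x.2.2 ∈ ks) :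
    PySem.List.insertBy (fun a b => decide (b.2.2 < a.2.2)) x (pvGrp l ks)
      = pvGrp (l ++ [x]) ks := by
  induction ks with
  | nil => cases hx
  | cons c ks' ih =>
    have hgt : ∀ c' ∈ ks', c > c' := fun c' hc' => List.rel_of_pairwise_cons hks hc'
    have htail : ks'.Pairwise (· > ·) := hks.of_cons
    have hmem : ∀ y ∈ pvGrp l ks', ∃ c' ∈ ks', y.2.2 = c' := by
      intro y hy
      simp only [pvGrp, List.mem_flatMap, List.mem_filter, decide_eq_true_eq] at hy
      obtain ⟨c', hc', _, hyc⟩ := hy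
      exact ⟨c', hc', hyc⟩
    by_cases hxc : x.2.2 = c
    · have h1 : ∀ y ∈ l.filter (fun t => decide (t.2.2 = c)), (decide (y.2.2 < x.2.2)) = false := by
        intro y hy
        have : y.2.2 = c := by simpa using (List.mem_filter.mp hy).2
        simp [this, hxc]
      have h2 : ∀ y ∈ pvGrp l ks', (decide (y.2.2 < x.2.2)) = true := by
        intro y hy
        obtain ⟨c', hc', hyc⟩ := hmem y hy
        have := hgt c' hc'
        simp [hyc, hxc]; omega
      have hnot : x.2.2 ∉ ks' := by
        intro h; have := hgt _ h; omega
      show PySem.List.insertBy _ x (l.filter (fun t => decide (t.2.2 = c)) ++ pvGrp l ks') = _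
      rw [pv_insertBy_append_not_before _ _ _ _ h1, pv_insertBy_forall_before _ _ _ h2]
      show _ = (l ++ [x]).filter (fun t => decide (t.2.2 = c)) ++ pvGrp (l ++ [x]) ks'
      rw [pvGrp_append_not_mem l ks' x hnot]
      simp [List.filter_append, hxc]
    · have hx' : x.2.2 ∈ ks' := by
        rcases List.mem_cons.mp hx with h | h
        · exact absurd h hxc
        · exact h
      have hlt : x.2.2 < c := hgt _ hx'
      have h1 : ∀ y ∈ l.filter (fun t => decide (t.2.2 = c)), (decide (y.2.2 < x.2.2)) = false := by
        intro y hy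
        have : y.2.2 = c := by simpa using (List.mem_filter.mp hy).2
        simp [this]; omega
      show PySem.List.insertBy _ x (l.filter (fun t => decide (t.2.2 = c)) ++ pvGrp l ks') = _
      rw [pv_insertBy_append_not_before _ _ _ _ h1, ih htail hx']
      show _ = (l ++ [x]).filter (fun t => decide (t.2.2 = c)) ++ pvGrp (l ++ [x]) ks'
      simp [List.filter_append, hxc]

-- the stable descending sort by count is the concatenation of the groups of a strictly
-- descending key list covering all counts
theorem pv_sorted_eq_grp (l : List (String × Int × Int)) (ks : List Int)
    (hks : ks.Pairwise (· > ·)) (hcov : ∀ t ∈ l, t.2.2 ∈ ks) :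
    PySem.List.sorted l (fun t => t.2.2) true = pvGrp l ks := by
  induction l using List.reverseRecOn with
  | nil => simp [PySem.List.sorted_rev_eq_foldl_insertBy, pvGrp]
  | append_singleton l x ih =>
    rw [PySem.List.sorted_rev_eq_foldl_insertBy, List.foldl_append,
        ← PySem.List.sorted_rev_eq_foldl_insertBy,
        ih (fun t ht => hcov t (by simp [ht]))]
    simpa using pv_insert_grp l ks hks x (hcov x (by simp))

-- generic characterization of the four-lists-plus-running-sum emitting fold
theorem pv_fold_emit {α : Type} (f : α → String) (g h : α → Int) (xs : List α)
    (a : List String) (b c d : List Int) (s : Int) :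
    xs.foldl (fun (acc : List String × List Int × List Int × List Int × Int) t =>
      (acc.1 ++ [f t], acc.2.1 ++ [g t], acc.2.2.1 ++ [h t],
       acc.2.2.2.1 ++ [acc.2.2.2.2 + h t], acc.2.2.2.2 + h t)) (a, b, c, d, s)
    = (a ++ xs.map f, b ++ xs.map g, c ++ xs.map h,
       d ++ pvCum s (xs.map h), s + (xs.map h).sum) := by
  induction xs generalizing a b c d s with
  | nil => simp [show pvCum s [] = [] from rfl]
  | cons x rest ih =>
    simp only [List.foldl_cons, List.map_cons, pvCum, ih]
    simp [List.append_assoc]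
    omega

-- insertBy with a key that factors through a map commutes with the map
theorem pv_insertBy_map {ι α κ : Type} [LT κ] [DecidableLT κ] (key : α → κ) (g : ι → α)
    (x : ι) (l : List ι) :
    PySem.List.insertBy (fun a b => decide (key b < key a)) (g x) (l.map g)
      = (PySem.List.insertBy (fun a b => decide (key (g b) < key (g a))) x l).map g := by
  induction l with
  | nil => simp [PySem.List.insertBy]
  | cons y ys ih =>
    simp only [List.map_cons, PySem.List.insertBy]
    split_ifs <;> simp_all

-- stable descending sort of a mapped list = map of the sort with the composed key
theorem pv_sorted_map {ι α κ : Type} [LT κ] [DecidableLT κ] (key : α → κ) (g : ι → α)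
    (l : List ι) :
    PySem.List.sorted (l.map g) key true = (PySem.List.sorted l (fun i => key (g i)) true).map g := by
  rw [PySem.List.sorted_rev_eq_foldl_insertBy, PySem.List.sorted_rev_eq_foldl_insertBy]
  suffices h : ∀ acc : List ι,
      (l.map g).foldl (fun acc x => PySem.List.insertBy (fun a b => decide (key b < key a)) x acc) (acc.map g)
        = (l.foldl (fun acc x => PySem.List.insertBy (fun a b => decide (key (g b) < key (g a))) x acc) acc).map g by
    simpa using h []
  induction l with
  | nil => simp
  | cons y ys ih =>
    intro acc
    simp only [List.map_cons, List.foldl_cons]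
    rw [pv_insertBy_map, ih]

-- pyRange 0 n with the default step is range n, cast to Int
theorem pv_pyRange_zero (n : Nat) :
    PySem.List.pyRange 0 (n : Int) = (List.range n).map Int.ofNat := by
  rcases Nat.eq_zero_or_pos n with h | h
  · subst h; simp [PySem.List.pyRange]
  · have h0 : (0 : Int) < (n : Int) := by exact_mod_cast h
    have hc : (((n : Int) - 0 + 1 - 1) / 1).toNat = n := by simp
    simp only [PySem.List.pyRange, h0, hc]
    simp [Int.ofNat_eq_natCast]

def pvGather (phrases : List String) (phrases_token_size : List Int) (count_list : List Int) (i : Int) : String × Int × Int :=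
  ((PySem.List.pyGet? phrases i).getD "", (PySem.List.pyGet? phrases_token_size i).getD 0, (PySem.List.pyGet? count_list i).getD 0)

-- the zipped triples are the gathers of the indices 0..len-1 (under Pre_)
theorem pv_zip_eq_map (phrases : List String) (phrases_token_size : List Int) (count_list : List Int)
    (h1 : count_list.length ≤ phrases.length) (h2 : count_list.length ≤ phrases_token_size.length) :
    phrases.zip (phrases_token_size.zip count_list)
      = (PySem.List.pyRange 0 (count_list.length : Int)).map (pvGather phrases phrases_token_size count_list) := by
  rw [pv_pyRange_zero]
  apply List.ext_getElem
  · simp; omega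
  · intro i hi hi'
    have hip : i < phrases.length := by simp at hi; omega
    have hit : i < phrases_token_size.length := by simp at hi; omega
    have hic : i < count_list.length := by simp at hi; omega
    simp only [List.getElem_map, List.getElem_range, List.getElem_zip]
    simp [pvGather, Int.ofNat_eq_natCast, hip, hit, hic]

-- B's outer fold over the key list concatenates the groups and their cumulative sums
theorem pv_foldB_outer (triples : List (String × Int × Int)) (g : Int → List (String × Int × Int))
    (ks : List Int) (hg : ∀ k ∈ ks, g k = triples.filter (fun t => decide (t.2.2 = k)))
    (a : List String) (b c d : List Int) (s : Int) :
    ks.foldl (fun (acc : List String × List Int × List Int × List Int × Int) k =>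
      (g k).foldl (fun (acc : List String × List Int × List Int × List Int × Int) t =>
        (acc.1 ++ [t.1], acc.2.1 ++ [t.2.1], acc.2.2.1 ++ [k],
         acc.2.2.2.1 ++ [acc.2.2.2.2 + k], acc.2.2.2.2 + k)) acc) (a, b, c, d, s)
    = (a ++ (pvGrp triples ks).map (fun t => t.1),
       b ++ (pvGrp triples ks).map (fun t => t.2.1),
       c ++ (pvGrp triples ks).map (fun t => t.2.2),
       d ++ pvCum s ((pvGrp triples ks).map (fun t => t.2.2)),
       s + ((pvGrp triples ks).map (fun t => t.2.2)).sum) := by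
  induction ks generalizing a b c d s with
  | nil => simp [pvGrp, show ∀ t : Int, pvCum t [] = [] from fun _ => rfl]
  | cons k ks' ih =>
    have hmap : (triples.filter (fun t => decide (t.2.2 = k))).map (fun _ => k)
        = (triples.filter (fun t => decide (t.2.2 = k))).map (fun t => t.2.2) := by
      apply List.map_congr_left
      intro t ht
      have : t.2.2 = k := by simpa using (List.mem_filter.mp ht).2
      simp [this]
    simp only [List.foldl_cons, hg k (by simp)]
    rw [pv_fold_emit (α := String × Int × Int) (fun t => t.1) (fun t => t.2.1) (fun _ => k)]
    rw [hmap, ih (fun k' hk' => hg k' (by simp [hk']))]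
    simp [pvGrp, List.append_assoc, pvCum_append]
    omega

-- the bucket dict: its keys are the distinct counts, its entries the filtered groups
theorem pv_groups_getD (triples : List (String × Int × Int)) (c : Int) :
    (triples.foldl (fun (d : PySem.Dict Int (List (String × Int × Int))) t =>
        d.modify t.2.2 [] (· ++ [t])) PySem.Dict.empty).getD c []
      = triples.filter (fun t => decide (t.2.2 = c)) := by
  have hfold : triples.foldl (fun (d : PySem.Dict Int (List (String × Int × Int))) t =>
        d.modify t.2.2 [] (· ++ [t])) PySem.Dict.empty
      = (triples.map (fun t => (t.2.2, t))).foldl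
          (fun (d : PySem.Dict Int (List (String × Int × Int))) p => d.modify p.1 [] (· ++ [p.2]))
          PySem.Dict.empty := by
    rw [List.foldl_map]
  rw [hfold, PySem.Dict.getD_foldl_modify_append]
  simp [List.filter_map, Function.comp_def, List.map_map]
  exact List.filter_congr (fun t _ => rfl)


theorem pv_groups_keys (triples : List (String × Int × Int)) :
    (triples.foldl (fun (d : PySem.Dict Int (List (String × Int × Int))) t =>
        d.modify t.2.2 [] (· ++ [t])) PySem.Dict.empty).keys
      = PySem.Set.ofList (triples.map (fun t => t.2.2)) := by
  rw [PySem.Dict.keys_foldl_modify_key]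
  simp [PySem.Set.update_nil_left]

-- ===== VERDICT (by name: the statement is the Claim_ definition above) =====
theorem get_sorted_list_with_cumulative_spec : Claim_equal_get_sorted_list_with_cumulative := by
  intro phrases phrases_token_size count_list _ hpre
  obtain ⟨h1, h2⟩ := hpre
  show get_sorted_list_with_cumulative _ _ _ = _
  unfold get_sorted_list_with_cumulative get_sorted_list_with_cumulative_alt
  dsimp only
  rw [pv_groups_keys]
  -- the key list is strictly descending …
  have hnd : (PySem.List.sorted (PySem.Set.ofList ((phrases.zip (phrases_token_size.zip count_list)).map (fun t => t.2.2))) (fun x => x) true).Nodup :=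
    (PySem.List.sorted_perm _ _ _).nodup_iff.mpr (PySem.Set.nodup_ofList _)
  have hdesc : (PySem.List.sorted (PySem.Set.ofList ((phrases.zip (phrases_token_size.zip count_list)).map (fun t => t.2.2))) (fun x => x) true).Pairwise (· > ·) := by
    have hle := PySem.List.sorted_pairwise_rev (PySem.Set.ofList ((phrases.zip (phrases_token_size.zip count_list)).map (fun t => t.2.2))) (fun x => x)
    exact (hnd.and hle).imp (fun h => by omega)
  -- … and covers every count of the zipped triples
  have hcov : ∀ t ∈ phrases.zip (phrases_token_size.zip count_list),
      t.2.2 ∈ PySem.List.sorted (PySem.Set.ofList ((phrases.zip (phrases_token_size.zip count_list)).map (fun t => t.2.2))) (fun x => x) true := by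
    intro t ht
    rw [PySem.List.mem_sorted, PySem.Set.mem_ofList]
    exact List.mem_map_of_mem ht
  -- A side: gather over sorted indices = stable sort of the triples
  rw [pv_fold_emit]
  have hA : phrases.zip (phrases_token_size.zip count_list)
      = (PySem.List.pyRange 0 (count_list.length : Int)).map (pvGather phrases phrases_token_size count_list) :=
    pv_zip_eq_map phrases phrases_token_size count_list h1 h2
  have hS : PySem.List.sorted (phrases.zip (phrases_token_size.zip count_list)) (fun t => t.2.2) true
      = (PySem.List.sorted (PySem.List.pyRange 0 (count_list.length : Int))
          (fun x => (PySem.List.pyGet? count_list x).getD 0) true).map (pvGather phrases phrases_token_size count_list) := by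
    rw [hA, pv_sorted_map]
    rfl
  -- B side: outer fold = buckets in descending-key order = the same stable sort
  rw [pv_foldB_outer (phrases.zip (phrases_token_size.zip count_list)) _ _
        (fun k _ => pv_groups_getD (phrases.zip (phrases_token_size.zip count_list)) k)]
  rw [← pv_sorted_eq_grp _ _ hdesc hcov, hS]
  simp [pvGather, List.map_map, Function.comp_def]
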